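-- pv_equiv track=rewrite | github.com/JoseBlanca/franklin | franklin/gmod/cmap.py | _cmap_correspondences
-- ===== SOURCE A (Python) =====
-- from itertools import combinations
--
-- def _cmap_correspondences(marker_count, marker_id_map):
--     '''It prints the correspondence pragmas. It needs a list of all the
--     correspondences'''
--     strs = []
--     for correspondences in marker_count.values():
--         for marker1, marker2 in combinations(correspondences, 2):
--             str_ = ['##cmap_corr evidence_type_acc=ANB;']
--             str_.append('ID1=%s;map_set_acc1=%s;map_acc1=%s;' % (marker1,
--                                                  marker_id_map[marker1][0],
--                                                  marker_id_map[marker1][1]))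
--             str_.append('ID2=%s;map_set_acc2=%s;map_acc2=%s;' % (marker2,
--                                                  marker_id_map[marker2][0],
--                                                  marker_id_map[marker2][1]))
--             strs.append(''.join(str_))
--     return strs
-- ===== SOURCE B (Python) =====
-- def _cmap_correspondences(marker_count, marker_id_map):
--     '''It prints the correspondence pragmas. It needs a list of all the
--     correspondences'''
--
--     def fmt(marker1, marker2):
--         acc1 = marker_id_map[marker1]
--         acc2 = marker_id_map[marker2]
--         return ('##cmap_corr evidence_type_acc=ANB;'
--                 'ID1=%s;map_set_acc1=%s;map_acc1=%s;'
--                 'ID2=%s;map_set_acc2=%s;map_acc2=%s;'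
--                 % (marker1, acc1[0], acc1[1], marker2, acc2[0], acc2[1]))
--
--     def group_strs(markers):
--         # recursion on the tail: head paired with every later marker,
--         # then the same for the tail
--         if len(markers) < 2:
--             return []
--         head, tail = markers[0], markers[1:]
--         return [fmt(head, other) for other in tail] + group_strs(tail)
--
--     result = []
--     for correspondences in marker_count.values():
--         result += group_strs(correspondences)
--     return result
-- ===== Notes on version B (the rewrite author's own statement) =====
-- stated objective: alternative
-- what changed: Replaces the itertools.combinations enumeration with per-group append-in-the-pair-loop by a head/tail recursion that builds each group's whole block at once (a comprehension of the head against its tail concatenated with the recursive block of the tail) and one single-format-string helper instead of joining three fragments, extending the result group-block by group-block.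
import Mathlib
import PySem

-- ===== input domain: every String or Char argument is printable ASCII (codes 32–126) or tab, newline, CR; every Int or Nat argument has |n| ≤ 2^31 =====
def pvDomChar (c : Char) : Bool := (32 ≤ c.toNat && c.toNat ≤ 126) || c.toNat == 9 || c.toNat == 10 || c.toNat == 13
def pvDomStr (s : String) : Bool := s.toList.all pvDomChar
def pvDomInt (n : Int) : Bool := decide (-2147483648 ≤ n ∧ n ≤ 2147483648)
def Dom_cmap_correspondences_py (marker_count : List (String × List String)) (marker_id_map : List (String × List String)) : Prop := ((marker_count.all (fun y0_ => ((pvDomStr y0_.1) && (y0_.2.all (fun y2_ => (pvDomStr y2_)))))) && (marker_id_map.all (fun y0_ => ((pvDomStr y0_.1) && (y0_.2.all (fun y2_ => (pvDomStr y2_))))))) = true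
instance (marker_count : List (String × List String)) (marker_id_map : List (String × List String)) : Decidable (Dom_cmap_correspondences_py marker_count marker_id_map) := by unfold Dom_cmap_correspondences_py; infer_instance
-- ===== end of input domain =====

-- B replaces the combinations pair loop (append per pair) by a head/tail recursion that
-- builds each group's whole block at once and extends the result per group (objective: alternative).

-- ===== PORT A =====
-- itertools.combinations(l, 2) in iteration order
def pvCombos {α : Type} : List α → List (α × α)
  | [] => []
  | x :: rest => rest.map (fun y => (x, y)) ++ pvCombos rest

def cmap_correspondences_py (marker_count : List (String × List String)) (marker_id_map : List (String × List String)) : List String :=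
  marker_count.foldl (fun strs g =>
    (pvCombos g.2).foldl (fun strs p =>
      -- marker_id_map[m][i]: KeyError/IndexError are excluded by Pre_; outside it getD/pyGet? default
      strs ++ ["##cmap_corr evidence_type_acc=ANB;" ++
        ("ID1=" ++ p.1 ++ ";map_set_acc1=" ++ ((PySem.List.pyGet? ((PySem.Dict.mk marker_id_map).getD p.1 []) 0).getD "") ++ ";map_acc1=" ++ ((PySem.List.pyGet? ((PySem.Dict.mk marker_id_map).getD p.1 []) 1).getD "") ++ ";") ++
        ("ID2=" ++ p.2 ++ ";map_set_acc2=" ++ ((PySem.List.pyGet? ((PySem.Dict.mk marker_id_map).getD p.2 []) 0).getD "") ++ ";map_acc2=" ++ ((PySem.List.pyGet? ((PySem.Dict.mk marker_id_map).getD p.2 []) 1).getD "") ++ ";")]) strs) []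

-- ===== PORT B =====
-- helper fmt of Source B (one format string); KeyError/IndexError excluded by Pre_
def pvFmt (marker_id_map : List (String × List String)) (marker1 marker2 : String) : String :=
  let acc1 := (PySem.Dict.mk marker_id_map).getD marker1 []
  let acc2 := (PySem.Dict.mk marker_id_map).getD marker2 []
  "##cmap_corr evidence_type_acc=ANB;ID1=" ++ marker1 ++ ";map_set_acc1=" ++
    ((PySem.List.pyGet? acc1 0).getD "") ++ ";map_acc1=" ++ ((PySem.List.pyGet? acc1 1).getD "") ++
    ";ID2=" ++ marker2 ++ ";map_set_acc2=" ++ ((PySem.List.pyGet? acc2 0).getD "") ++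
    ";map_acc2=" ++ ((PySem.List.pyGet? acc2 1).getD "") ++ ";"

-- helper group_strs of Source B: head paired with every later marker, then the tail
def pvGroupStrs (marker_id_map : List (String × List String)) : List String → List String
  | [] => []
  | [_] => []
  | head :: tail => (tail.map (pvFmt marker_id_map head)) ++ pvGroupStrs marker_id_map tail

def cmap_correspondences_py_alt (marker_count : List (String × List String)) (marker_id_map : List (String × List String)) : List String :=
  marker_count.foldl (fun result g => result ++ pvGroupStrs marker_id_map g.2) []

-- ===== PRECONDITION & SPEC =====
-- Pre_ excludes exactly the inputs where A raises: a group with ≥2 markers containing a marker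
-- missing from marker_id_map (KeyError) or mapped to a list of fewer than 2 accessions (IndexError).
def Pre_cmap_correspondences_py (marker_count : List (String × List String)) (marker_id_map : List (String × List String)) : Prop :=
  (marker_count.all (fun g => decide (g.2.length < 2) ||
    g.2.all (fun m => decide (2 ≤ ((PySem.Dict.mk marker_id_map).getD m []).length)))) = true
instance (marker_count : List (String × List String)) (marker_id_map : List (String × List String)) : Decidable (Pre_cmap_correspondences_py marker_count marker_id_map) := by unfold Pre_cmap_correspondences_py; infer_instance

def pvWitness_cmap_correspondences_py : (List (String × List String)) × (List (String × List String)) :=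
  ([("g1", ["a", "b"])], [("a", ["s1", "m1"]), ("b", ["s2", "m2"])])

def Spec_cmap_correspondences_py (marker_count : List (String × List String)) (marker_id_map : List (String × List String)) (out : List String) : Prop := out = cmap_correspondences_py_alt marker_count marker_id_map
instance (marker_count : List (String × List String)) (marker_id_map : List (String × List String)) (out : List String) : Decidable (Spec_cmap_correspondences_py marker_count marker_id_map out) := by unfold Spec_cmap_correspondences_py; infer_instance

-- ===== CLAIM (what is proved, stated in full; the proofs are below) =====
def Claim_equal_cmap_correspondences_py : Prop := ∀ (marker_count : List (String × List String)) (marker_id_map : List (String × List String)), Dom_cmap_correspondences_py marker_count marker_id_map → Pre_cmap_correspondences_py marker_count marker_id_map → Spec_cmap_correspondences_py marker_count marker_id_map (cmap_correspondences_py marker_count marker_id_map)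

-- ===== LEMMAS AND PROOFS =====

-- a fold of appends is the accumulator followed by the mapped list
theorem foldl_append_map {α β : Type} (g : α → β) (l : List α) (acc : List β) :
    l.foldl (fun a x => a ++ [g x]) acc = acc ++ l.map g := by
  induction l generalizing acc with
  | nil => simp
  | cons x rest ih => simp [ih]

-- A's per-pair string equals B's pvFmt (re-association of the concatenation)
theorem fmt_eq (marker_id_map : List (String × List String)) (p : String × String) :
    ("##cmap_corr evidence_type_acc=ANB;" ++
      ("ID1=" ++ p.1 ++ ";map_set_acc1=" ++ ((PySem.List.pyGet? ((PySem.Dict.mk marker_id_map).getD p.1 []) 0).getD "") ++ ";map_acc1=" ++ ((PySem.List.pyGet? ((PySem.Dict.mk marker_id_map).getD p.1 []) 1).getD "") ++ ";") ++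
      ("ID2=" ++ p.2 ++ ";map_set_acc2=" ++ ((PySem.List.pyGet? ((PySem.Dict.mk marker_id_map).getD p.2 []) 0).getD "") ++ ";map_acc2=" ++ ((PySem.List.pyGet? ((PySem.Dict.mk marker_id_map).getD p.2 []) 1).getD "") ++ ";")) =
    pvFmt marker_id_map p.1 p.2 := by
  simp only [pvFmt,
    show ("##cmap_corr evidence_type_acc=ANB;ID1=" : String) =
      "##cmap_corr evidence_type_acc=ANB;" ++ "ID1=" from rfl,
    show ((";ID2=" : String)) = ";" ++ "ID2=" from rfl,
    String.append_assoc]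

-- the mapped combinations of a group are exactly B's recursive group block
theorem map_combos_eq_groupStrs (marker_id_map : List (String × List String)) (l : List String) :
    (pvCombos l).map (fun p => pvFmt marker_id_map p.1 p.2) = pvGroupStrs marker_id_map l := by
  induction l with
  | nil => rfl
  | cons x rest ih =>
    rw [show pvCombos (x :: rest) = rest.map (fun y => (x, y)) ++ pvCombos rest from rfl,
        List.map_append, List.map_map, ih]
    cases rest with
    | nil => rfl
    | cons y t => rfl

-- ===== VERDICT (by name: the statement is the Claim_ definition above) =====
set_option maxHeartbeats 1000000 in
theorem cmap_correspondences_py_spec : Claim_equal_cmap_correspondences_py := by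
  intro marker_count marker_id_map hD hP
  clear hD hP
  unfold Spec_cmap_correspondences_py cmap_correspondences_py cmap_correspondences_py_alt
  induction marker_count using List.reverseRecOn with
  | nil => rfl
  | append_singleton front g ih =>
    simp only [List.foldl_append, List.foldl_cons, List.foldl_nil]
    rw [ih, foldl_append_map]
    congr 1
    rw [← map_combos_eq_groupStrs]
    exact List.map_congr_left fun p _ => fmt_eq marker_id_map p
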